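-- pv_equiv track=rewrite | github.com/kakalasek/PV | 18_Algoritmizace/4_Lodicky_zobecneni/lodicky.py | boat_brute_force
-- ===== SOURCE A (Python) =====
-- import itertools
-- import math
--
-- def boat_brute_force(space: list):
--     perms = list(itertools.permutations(space))
--     best = math.inf
--     results = list()
--     for perm in perms:
--         if abs(perm[0] - perm[len(perm) - 1]) < best:
--             best = abs(perm[0] - perm[len(perm) - 1])
--
--     for perm in perms:
--         if abs(perm[0] - perm[len(perm) - 1]) == best:
--             results.append(perm)
--
--     return results
-- ===== SOURCE B (Python) =====
-- import itertools
-- import math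
--
-- def boat_brute_force(space: list):
--     best = math.inf
--     results = []
--     for perm in itertools.permutations(space):
--         d = abs(perm[0] - perm[-1])
--         if d < best:
--             best = d
--             results = [perm]
--         elif d == best:
--             results.append(perm)
--     return results
-- ===== Notes on version B (the rewrite author's own statement) =====
-- stated objective: simpler
-- what changed: B replaces A's materialized permutation list and two full passes (one to find the minimum endpoint difference, one to collect) by a single streaming pass that resets the result list on strict improvement and appends on ties.
import Mathlib
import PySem

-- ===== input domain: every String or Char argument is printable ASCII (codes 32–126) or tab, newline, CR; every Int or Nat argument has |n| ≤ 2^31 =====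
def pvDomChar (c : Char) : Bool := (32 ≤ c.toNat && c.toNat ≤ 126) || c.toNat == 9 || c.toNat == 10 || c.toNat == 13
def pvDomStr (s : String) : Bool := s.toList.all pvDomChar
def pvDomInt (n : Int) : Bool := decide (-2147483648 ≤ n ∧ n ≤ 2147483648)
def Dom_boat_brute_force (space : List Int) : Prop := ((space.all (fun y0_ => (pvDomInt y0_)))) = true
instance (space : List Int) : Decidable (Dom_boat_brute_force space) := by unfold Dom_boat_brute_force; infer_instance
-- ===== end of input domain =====

-- B merges A's two passes over the permutations into one streaming pass (reset on strict
-- improvement, append on tie); objective: simpler. Return-value equivalence on nonempty input.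

-- ===== PORT A =====
-- abs(perm[0] - perm[len(perm)-1]); exact for nonempty perm (every permutation of a nonempty
-- space is nonempty; Pre_ excludes the empty space, where Python raises IndexError).
def pvDiff (p : List Int) : Int :=
  |(PySem.List.pyGet? p 0).getD 0 - (PySem.List.pyGet? p ((p.length : Int) - 1)).getD 0|

-- 'd < best' / 'd == best' against best = math.inf (none) or an Int (some b)
def pvLtInf (d : Int) : Option Int → Bool
  | none => true
  | some b => d < b

def pvEqInf (d : Int) : Option Int → Bool
  | none => false
  | some b => d == b

def boat_brute_force (space : List Int) : List (List Int) :=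
  let perms := PySem.List.permutations space space.length
  let best := perms.foldl (fun b p => if pvLtInf (pvDiff p) b then some (pvDiff p) else b) none
  perms.foldl (fun res p => if pvEqInf (pvDiff p) best then res ++ [p] else res) []

-- ===== PORT B =====
-- one loop body: if d < best: best, results = d, [perm]; elif d == best: results.append(perm)
def pvStep : (Option Int × List (List Int)) → List Int → (Option Int × List (List Int))
  | (none, _), p => (some (pvDiff p), [p])
  | (some b, rs), p =>
    if pvDiff p < b then (some (pvDiff p), [p])
    else if pvDiff p = b then (some b, rs ++ [p])
    else (some b, rs)

def boat_brute_force_alt (space : List Int) : List (List Int) :=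
  ((PySem.List.permutations space space.length).foldl pvStep (none, [])).2

-- ===== PRECONDITION & SPEC =====
-- Pre_ excludes only the empty list, on which Python A raises IndexError (perm[0] of the empty tuple).
def Pre_boat_brute_force (space : List Int) : Prop := space ≠ []
instance (space : List Int) : Decidable (Pre_boat_brute_force space) := by
  unfold Pre_boat_brute_force; infer_instance
def pvWitness_boat_brute_force : List Int := ([1, 2] : List Int)

def Spec_boat_brute_force (space : List Int) (out : List (List Int)) : Prop := out = boat_brute_force_alt space
instance (space : List Int) (out : List (List Int)) : Decidable (Spec_boat_brute_force space out) := by unfold Spec_boat_brute_force; infer_instance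

-- ===== CLAIM (what is proved, stated in full; the proofs are below) =====
def Claim_equal_boat_brute_force : Prop := ∀ (space : List Int), Dom_boat_brute_force space → Pre_boat_brute_force space → Spec_boat_brute_force space (boat_brute_force space)

-- ===== LEMMAS AND PROOFS =====

-- the running minimum maintained by A's first pass, generalized to an arbitrary start
def pvMin (b : Option Int) (ps : List (List Int)) : Option Int :=
  ps.foldl (fun b p => if pvLtInf (pvDiff p) b then some (pvDiff p) else b) b

theorem pvMin_some (ps : List (List Int)) (x : Int) :
    ∃ y, pvMin (some x) ps = some y ∧ y ≤ x := by
  induction ps generalizing x with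
  | nil => exact ⟨x, rfl, le_refl x⟩
  | cons p ps ih =>
    simp only [pvMin, List.foldl_cons, pvLtInf]
    by_cases h : pvDiff p < x
    · simp only [h, decide_true, if_pos trivial]
      obtain ⟨y, hy, hle⟩ := ih (pvDiff p)
      exact ⟨y, hy, by omega⟩
    · simp only [h, decide_false, Bool.false_eq_true, if_false]
      exact ih x

theorem pvStep_fold (ps : List (List Int)) (b : Option Int) (rs : List (List Int)) :
    ps.foldl pvStep (b, rs) =
      (pvMin b ps,
        (if pvMin b ps = b then rs else []) ++
          ps.filter (fun p => pvEqInf (pvDiff p) (pvMin b ps))) := by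
  induction ps generalizing b rs with
  | nil => simp [pvMin, pvEqInf]
  | cons p ps ih =>
    simp only [List.foldl_cons]
    match b with
    | none =>
      have hmin : pvMin none (p :: ps) = pvMin (some (pvDiff p)) ps := by
        simp [pvMin, pvLtInf]
      obtain ⟨y, hy, hle⟩ := pvMin_some ps (pvDiff p)
      rw [show pvStep (none, rs) p = (some (pvDiff p), [p]) from rfl, ih, hmin, hy]
      simp only [List.filter_cons, Option.some.injEq, reduceCtorEq, if_false, List.nil_append]
      by_cases hd : y = pvDiff p
      · subst hd; simp [pvEqInf]
      · have : pvEqInf (pvDiff p) (some y) = false := by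
          simp [pvEqInf]; omega
        simp [this, hd]
    | some x =>
      by_cases hlt : pvDiff p < x
      · have hmin : pvMin (some x) (p :: ps) = pvMin (some (pvDiff p)) ps := by
          simp [pvMin, pvLtInf, hlt]
        obtain ⟨y, hy, hle⟩ := pvMin_some ps (pvDiff p)
        rw [show pvStep (some x, rs) p = (some (pvDiff p), [p]) from by
          simp [pvStep, hlt], ih, hmin, hy]
        have hne : (some y : Option Int) ≠ some x := by
          simp only [ne_eq, Option.some.injEq]; omega
        simp only [List.filter_cons, hne, if_false, List.nil_append]
        by_cases hd : y = pvDiff p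
        · subst hd; simp [pvEqInf]
        · have : pvEqInf (pvDiff p) (some y) = false := by
            simp [pvEqInf]; omega
          simp [this, hd]
      · have hmin : pvMin (some x) (p :: ps) = pvMin (some x) ps := by
          simp [pvMin, pvLtInf, hlt]
        obtain ⟨y, hy, hle⟩ := pvMin_some ps x
        by_cases heq : pvDiff p = x
        · rw [show pvStep (some x, rs) p = (some x, rs ++ [p]) from by
            simp [pvStep, heq], ih, hmin, hy]
          simp only [List.filter_cons]
          by_cases hyx : y = x
          · subst hyx
            have : pvEqInf (pvDiff p) (some y) = true := by simp [pvEqInf, heq]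
            simp [this]
          · have : pvEqInf (pvDiff p) (some y) = false := by
              simp [pvEqInf]; omega
            have hne : (some y : Option Int) ≠ some x := by simp [hyx]
            simp [this, hne]
        · rw [show pvStep (some x, rs) p = (some x, rs) from by
            simp only [pvStep, if_neg hlt, if_neg heq], ih, hmin, hy]
          simp only [List.filter_cons]
          have : pvEqInf (pvDiff p) (some y) = false := by
            simp only [pvEqInf, beq_eq_false_iff_ne, ne_eq]; omega
          simp [this]

-- ===== VERDICT (by name: the statement is the Claim_ definition above) =====
theorem boat_brute_force_spec : Claim_equal_boat_brute_force := by
  intro space _ _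
  unfold Spec_boat_brute_force boat_brute_force boat_brute_force_alt
  rw [pvStep_fold]
  simp only [PySem.List.foldl_append_if_eq_filter, List.nil_append]
  show List.filter _ _ = (if pvMin none _ = none then [] else []) ++ _
  rw [show (if pvMin none (PySem.List.permutations space space.length) = none then
      ([] : List (List Int)) else []) = [] from by split <;> rfl, List.nil_append]
  rfl
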